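-- pv_equiv track=rewrite | github.com/carrissaconstructivemetabolic667/AutoVideoCraft | src/autovideocraft/utils.py | vtt_to_srt
-- ===== SOURCE A (Python) =====
-- def vtt_to_srt(vtt_content: str) -> str:
--     """
--     Convert WebVTT format to SRT format for FFmpeg subtitle rendering.
--
--     Args:
--         vtt_content: Raw VTT subtitle content string.
--
--     Returns:
--         SRT-formatted subtitle string.
--     """
--     lines = vtt_content.strip().split("\n")
--     srt_lines = []
--     counter = 1
--     i = 0
--
--     # Skip WEBVTT header and any metadata
--     while i < len(lines) and "-->" not in lines[i]:
--         i += 1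
--
--     while i < len(lines):
--         line = lines[i].strip()
--         if "-->" in line:
--             # Convert VTT timestamp (HH:MM:SS.mmm) to SRT (HH:MM:SS,mmm)
--             srt_time = line.replace(".", ",")
--             srt_lines.append(str(counter))
--             srt_lines.append(srt_time)
--             counter += 1
--             i += 1
--             # Collect text lines until blank line or end
--             while i < len(lines) and lines[i].strip():
--                 srt_lines.append(lines[i].strip())
--                 i += 1
--             srt_lines.append("")  # blank line separator
--         i += 1
--
--     return "\n".join(srt_lines)
-- ===== SOURCE B (Python) =====
-- def _find_time(block):
--     """Return (timestamp_line, lines_after_it) for the first '-->' line, or None."""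
--     for j, l in enumerate(block):
--         if "-->" in l.strip():
--             return block[j], block[j + 1:]
--     return None
--
--
-- def vtt_to_srt(vtt_content: str) -> str:
--     lines = vtt_content.strip().split("\n")
--     # partition into blocks of consecutive non-blank lines
--     blocks = []
--     cur = []
--     for line in lines:
--         if line.strip():
--             cur.append(line)
--         else:
--             if cur:
--                 blocks.append(cur)
--             cur = []
--     if cur:
--         blocks.append(cur)
--     # emit one SRT cue per block that carries a timestamp line
--     out = []
--     counter = 1
--     for block in blocks:
--         found = _find_time(block)
--         if found is None:
--             continue
--         time_line, text = found
--         out.append(str(counter))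
--         out.append(time_line.strip().replace(".", ","))
--         out.extend(l.strip() for l in text)
--         out.append("")
--         counter += 1
--     return "\n".join(out)
-- ===== Notes on version B (the rewrite author's own statement) =====
-- stated objective: alternative
-- what changed: Replaces A's index-pointer scan with nested while loops by a two-phase pipeline: first partition the lines into blank-separated blocks with a fold, then emit one SRT cue per block that contains a timestamp line (skipping any lines before it).
import Mathlib
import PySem

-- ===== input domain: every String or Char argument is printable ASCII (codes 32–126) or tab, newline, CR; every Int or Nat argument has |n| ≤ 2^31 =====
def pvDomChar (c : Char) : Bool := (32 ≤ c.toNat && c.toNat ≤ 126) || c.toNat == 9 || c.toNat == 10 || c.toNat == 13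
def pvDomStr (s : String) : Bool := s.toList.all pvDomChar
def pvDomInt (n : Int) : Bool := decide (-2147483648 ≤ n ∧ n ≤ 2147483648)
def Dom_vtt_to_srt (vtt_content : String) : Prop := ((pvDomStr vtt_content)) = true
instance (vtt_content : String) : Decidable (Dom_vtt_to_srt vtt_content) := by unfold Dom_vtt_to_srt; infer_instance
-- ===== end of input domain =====

-- B re-implements A's single index-pointer scan as a two-phase pipeline (partition into
-- blank-separated blocks, then emit one cue per block containing a timestamp line); same
-- cost, different decomposition ("alternative").

-- ===== PORT A =====
-- first while loop: skip header/metadata lines until one contains the timestamp arrow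
def aSkip : List String → List String
  | [] => []
  | l :: ls => if PySem.Str.isIn "-->" l then l :: ls else aSkip ls

-- innermost while loop: collect stripped text lines until a blank line or end;
-- returns (collected stripped lines, remaining lines starting at the blank line / [])
def aInner : List String → List String × List String
  | [] => ([], [])
  | l :: ls =>
    if PySem.Str.strip l ≠ "" then
      ((PySem.Str.strip l) :: (aInner ls).1, (aInner ls).2)
    else ([], l :: ls)

theorem aInner_snd_length_le (ls : List String) : (aInner ls).2.length ≤ ls.length := by
  induction ls with
  | nil => simp [aInner]
  | cons l ls ih =>
    simp only [aInner]
    split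
    · exact Nat.le_succ_of_le ih
    · simp

-- outer while loop over the remaining lines, carrying the cue counter
def aOuter : List String → Int → List String
  | [], _ => []
  | l :: rest, c =>
    let line := PySem.Str.strip l
    if PySem.Str.isIn "-->" line then
      [PySem.Int.toStr c, PySem.Str.replace line "." ","]
        ++ (aInner rest).1 ++ [""]
        ++ aOuter ((aInner rest).2.drop 1) (c + 1)
    else aOuter rest c
termination_by ls _ => ls.length
decreasing_by
  · have h := aInner_snd_length_le rest
    have : ((aInner rest).2.drop 1).length = (aInner rest).2.length - 1 := List.length_drop
    simp only [List.length_cons]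
    omega
  · simp only [List.length_cons]; omega

def vtt_to_srt (vtt_content : String) : String :=
  -- .split("\n") never raises (separator nonempty), so split? is some; getD is exact
  let lines := (PySem.Str.split? (PySem.Str.strip vtt_content) "\n").getD []
  PySem.Str.join "\n" (aOuter (aSkip lines) 1)

-- ===== PORT B =====
-- one step of the block-building fold (body of B's first for-loop)
def bSplitStep (acc : List (List String) × List String) (l : String) : List (List String) × List String :=
  if PySem.Str.strip l ≠ "" then (acc.1, acc.2 ++ [l])
  else if acc.2 ≠ [] then (acc.1 ++ [acc.2], []) else (acc.1, [])

-- partition the lines into blocks of consecutive non-blank lines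
def bSplit (lines : List String) : List (List String) :=
  let p := lines.foldl bSplitStep ([], [])
  if p.2 ≠ [] then p.1 ++ [p.2] else p.1

-- B's _find_time helper: first timestamp line of the block, with the lines after it
def bFindTime : List String → Option (String × List String)
  | [] => none
  | l :: ls =>
    if PySem.Str.isIn "-->" (PySem.Str.strip l) then some (l, ls) else bFindTime ls

-- one step of B's emitting for-loop over the blocks, carrying (output lines, counter)
def bEmitStep (acc : List String × Int) (block : List String) : List String × Int :=
  match bFindTime block with
  | none => acc
  | some (tl, text) =>
      (acc.1 ++ [PySem.Int.toStr acc.2, PySem.Str.replace (PySem.Str.strip tl) "." ","]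
         ++ text.map PySem.Str.strip ++ [""], acc.2 + 1)

def vtt_to_srt_alt (vtt_content : String) : String :=
  let lines := (PySem.Str.split? (PySem.Str.strip vtt_content) "\n").getD []
  PySem.Str.join "\n" ((bSplit lines).foldl bEmitStep ([], 1)).1

-- ===== PRECONDITION & SPEC =====
def Spec_vtt_to_srt (vtt_content : String) (out : String) : Prop := out = vtt_to_srt_alt vtt_content
instance (vtt_content : String) (out : String) : Decidable (Spec_vtt_to_srt vtt_content out) := by unfold Spec_vtt_to_srt; infer_instance

-- ===== CLAIM (what is proved, stated in full; the proofs are below) =====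
def Claim_equal_vtt_to_srt : Prop := ∀ (vtt_content : String), Dom_vtt_to_srt vtt_content → Spec_vtt_to_srt vtt_content (vtt_to_srt vtt_content)

-- ===== LEMMAS AND PROOFS =====

-- "non-blank line" predicate (Python truthiness of line.strip())
def pvNB (l : String) : Bool := decide (PySem.Str.strip l ≠ "")

-- common normal form of both programs' output-piece lists
def pvE : List String → Int → List String
  | [], _ => []
  | l :: ls, c =>
    if PySem.Str.isIn "-->" (PySem.Str.strip l) then
      [PySem.Int.toStr c, PySem.Str.replace (PySem.Str.strip l) "." ","]
        ++ (ls.takeWhile pvNB).map PySem.Str.strip ++ [""]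
        ++ pvE ((ls.dropWhile pvNB).drop 1) (c + 1)
    else pvE ls c
termination_by ls _ => ls.length
decreasing_by
  · have := List.length_dropWhile_le pvNB ls
    have : ((ls.dropWhile pvNB).drop 1).length = (ls.dropWhile pvNB).length - 1 := List.length_drop
    simp only [List.length_cons]; omega
  · simp only [List.length_cons]; omega

-- blank-separated blocks, span form
def pvBlocks : List String → List (List String)
  | [] => []
  | l :: ls =>
    if pvNB l then (l :: ls.takeWhile pvNB) :: pvBlocks (ls.dropWhile pvNB)
    else pvBlocks ls
termination_by ls => ls.length
decreasing_by
  · have := List.length_dropWhile_le pvNB ls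
    simp only [List.length_cons]; omega
  · simp only [List.length_cons]; omega

theorem aInner_eq (ls : List String) :
    aInner ls = ((ls.takeWhile pvNB).map PySem.Str.strip, ls.dropWhile pvNB) := by
  induction ls with
  | nil => rfl
  | cons l ls ih =>
    simp only [aInner, List.takeWhile, List.dropWhile, pvNB]
    by_cases h : PySem.Str.strip l ≠ "" <;> simp [h, ih]

theorem aOuter_eq_pvE (ls : List String) (c : Int) : aOuter ls c = pvE ls c := by
  induction ls, c using aOuter.induct with
  | case1 c => rw [aOuter, pvE]
  | case2 l rest c line h ih =>
      rw [aOuter, pvE, aInner_eq]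
      rw [aInner_eq] at ih
      split_ifs with hc
      · exact congrArg (fun t => [PySem.Int.toStr c, PySem.Str.replace (PySem.Str.strip l) "." ","]
          ++ List.map PySem.Str.strip (List.takeWhile pvNB rest) ++ [""] ++ t) ih
      · exact absurd h hc
  | case3 l rest c line h ih =>
      rw [aOuter, pvE]
      split_ifs with hc
      · exact absurd hc h
      · exact ih

-- an occurrence of the arrow in line.strip() is an occurrence in line (strip is an infix)
theorem strip_infix (l : List Char) : PySem.Chars.strip l <:+: l := by
  have h1 : PySem.Chars.lstrip l <:+ l := List.dropWhile_suffix _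
  have h2 : PySem.Chars.strip l <+: PySem.Chars.lstrip l := by
    have := List.dropWhile_suffix (l := (PySem.Chars.lstrip l).reverse) (p := PySem.Chars.isspace)
    simpa [PySem.Chars.strip, PySem.Chars.rstrip, ← List.reverse_suffix] using this
  exact h2.isInfix.trans h1.isInfix

theorem isIn_strip_imp (l : String) :
    PySem.Str.isIn "-->" (PySem.Str.strip l) = true → PySem.Str.isIn "-->" l = true := by
  intro h
  rw [PySem.Str.isIn_iff_infix] at h ⊢
  rw [PySem.Str.toList_strip] at h
  exact h.trans (strip_infix l.toList)

theorem pvE_skip (ls : List String) (c : Int) : pvE (aSkip ls) c = pvE ls c := by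
  induction ls using aSkip.induct with
  | case1 => rfl
  | case2 l ls h => rw [aSkip, if_pos h]
  | case3 l ls h ih =>
      rw [aSkip, if_neg h, ih, pvE,
        if_neg (fun hs => h (isIn_strip_imp l hs))]

theorem pvE_blank_cons (b : String) (r : List String) (c : Int)
    (hb : pvNB b = false) : pvE (b :: r) c = pvE r c := by
  have hs : PySem.Str.strip b = "" := by
    simpa [pvNB] using hb
  rw [pvE, hs, if_neg (by decide)]

theorem takeWhile_append_of_all (xs r : List String) (h : ∀ x ∈ xs, pvNB x = true) :
    (xs ++ r).takeWhile pvNB = xs ++ r.takeWhile pvNB := by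
  induction xs with
  | nil => simp
  | cons x xs ih =>
    simp only [List.cons_append, List.takeWhile_cons, h x (by simp), if_true]
    rw [ih (fun y hy => h y (by simp [hy]))]

theorem dropWhile_append_of_all (xs r : List String) (h : ∀ x ∈ xs, pvNB x = true) :
    (xs ++ r).dropWhile pvNB = r.dropWhile pvNB := by
  induction xs with
  | nil => simp
  | cons x xs ih =>
    simp only [List.cons_append, List.dropWhile_cons, h x (by simp)]
    exact ih (fun y hy => h y (by simp [hy]))

theorem takeWhile_dropWhile_nil (p : String → Bool) (l : List String) :
    (l.dropWhile p).takeWhile p = [] := by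
  simp only [List.takeWhile_eq_nil_iff]
  intro hl
  have hne : List.dropWhile p l ≠ [] := by intro h; rw [h] at hl; simp at hl
  have := List.head_dropWhile_not p hne
  simpa [List.head_eq_getElem] using this

-- Q: emitting from one all-non-blank block followed by a blank-headed remainder
theorem pvE_block (bl r : List String) (c : Int)
    (hbl : ∀ x ∈ bl, pvNB x = true) (hr : r.takeWhile pvNB = []) :
    pvE (bl ++ r) c =
      match bFindTime bl with
      | none => pvE r c
      | some (tl, text) =>
          [PySem.Int.toStr c, PySem.Str.replace (PySem.Str.strip tl) "." ","]
            ++ text.map PySem.Str.strip ++ [""] ++ pvE r (c + 1) := by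
  revert hbl
  induction bl with
  | nil => intro _; rw [bFindTime]; rw [List.nil_append]
  | cons l t ih =>
    intro hbl
    have htall : ∀ x ∈ t, pvNB x = true := fun x hx => hbl x (by simp [hx])
    rw [bFindTime]
    by_cases ht : PySem.Str.isIn "-->" (PySem.Str.strip l) = true
    · rw [if_pos ht, List.cons_append, pvE, if_pos ht,
        takeWhile_append_of_all t r htall, hr, List.append_nil,
        dropWhile_append_of_all t r htall]
      cases r with
      | nil => rfl
      | cons b r' =>
        have hb : pvNB b = false := by
          cases hpb : pvNB b with
          | false => rfl
          | true =>
            rw [List.takeWhile_cons, if_pos hpb] at hr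
            exact absurd hr (by simp)
        rw [List.dropWhile_cons, if_neg (by simp [hb]), List.drop_succ_cons,
          List.drop_zero]
        simp [pvE_blank_cons b r' (c + 1) hb]
    · rw [if_neg ht, List.cons_append, pvE, if_neg ht]
      exact ih htall

-- R1: the split fold only appends to the block list
theorem bSplit_foldl_shift (ls : List String) (bs : List (List String)) (cur : List String) :
    ls.foldl bSplitStep (bs, cur) =
      (bs ++ (ls.foldl bSplitStep ([], cur)).1, (ls.foldl bSplitStep ([], cur)).2) := by
  induction ls generalizing bs cur with
  | nil => simp
  | cons l ls ih =>
    rw [List.foldl_cons, List.foldl_cons]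
    have h1 : bSplitStep (bs, cur) l = (bs ++ (bSplitStep ([], cur) l).1, (bSplitStep ([], cur) l).2) := by
      unfold bSplitStep; split_ifs <;> simp
    rw [h1, ih (bs ++ (bSplitStep ([], cur) l).1) (bSplitStep ([], cur) l).2,
      show bSplitStep ([], cur) l = ((bSplitStep ([], cur) l).1, (bSplitStep ([], cur) l).2) from rfl,
      ih (bSplitStep ([], cur) l).1 (bSplitStep ([], cur) l).2]
    simp [List.append_assoc]

-- helper naming B's fold-with-finalize from an arbitrary pending block
def pvSplitAux (cur : List String) (ls : List String) : List (List String) :=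
  let p := ls.foldl bSplitStep ([], cur)
  if p.2 ≠ [] then p.1 ++ [p.2] else p.1

theorem pvSplitAux_eq (ls : List String) (cur : List String) :
    pvSplitAux cur ls =
      if cur = [] then pvBlocks ls
      else (cur ++ ls.takeWhile pvNB) :: pvBlocks (ls.dropWhile pvNB) := by
  induction ls generalizing cur with
  | nil => by_cases h : cur = [] <;> simp [pvSplitAux, pvBlocks, h]
  | cons l ls ih =>
    unfold pvSplitAux
    rw [List.foldl_cons]
    by_cases hl : pvNB l = true
    · have hstep : bSplitStep ([], cur) l = ([], cur ++ [l]) := by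
        unfold bSplitStep
        rw [if_pos (by simpa [pvNB] using hl)]
      rw [hstep]
      have h2 := ih (cur ++ [l])
      unfold pvSplitAux at h2
      rw [h2, if_neg (by simp)]
      by_cases hc : cur = [] <;>
        simp [hc, pvBlocks, hl, List.append_assoc]
    · have hl' : ¬ PySem.Str.strip l ≠ "" := by simpa [pvNB] using hl
      by_cases hc : cur = []
      · have hstep : bSplitStep ([], cur) l = ([], []) := by
          unfold bSplitStep
          rw [if_neg hl', if_neg (by simp [hc])]
        rw [hstep]
        have h2 := ih []
        unfold pvSplitAux at h2
        rw [h2, if_pos rfl, if_pos hc, pvBlocks, if_neg hl]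
      · have hstep : bSplitStep ([], cur) l = ([cur], []) := by
          unfold bSplitStep
          rw [if_neg hl', if_pos hc]
          simp
        rw [hstep, bSplit_foldl_shift ls [cur] []]
        have h2 := ih []
        unfold pvSplitAux at h2
        rw [if_pos rfl] at h2
        rw [if_neg hc]
        by_cases hy : (ls.foldl bSplitStep ([], [])).2 ≠ [] <;>
          simp [hy, hl] at h2 ⊢ <;>
          simp [← h2, pvBlocks, hl]

theorem bSplit_eq_pvBlocks (ls : List String) : bSplit ls = pvBlocks ls := by
  have h := pvSplitAux_eq ls []
  simpa [pvSplitAux, bSplit] using h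

-- M: emitting over the blocks is pvE
theorem foldl_emit_eq (ls : List String) : ∀ (acc : List String) (c : Int),
    ((pvBlocks ls).foldl bEmitStep (acc, c)).1 = acc ++ pvE ls c := by
  induction ls using pvBlocks.induct with
  | case1 => intro acc c; rw [pvBlocks, pvE]; simp
  | case2 l ls h ih =>
    intro acc c
    have hbl : ∀ x ∈ l :: ls.takeWhile pvNB, pvNB x = true := by
      intro x hx
      rcases List.mem_cons.1 hx with hx | hx
      · rw [hx]; exact h
      · exact List.mem_takeWhile_imp hx
    have hq := pvE_block (l :: ls.takeWhile pvNB) (ls.dropWhile pvNB) c hbl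
      (takeWhile_dropWhile_nil pvNB ls)
    rw [List.cons_append, List.takeWhile_append_dropWhile] at hq
    rw [pvBlocks, if_pos h, List.foldl_cons, hq]
    cases hft : bFindTime (l :: ls.takeWhile pvNB) with
    | none =>
      simp only [bEmitStep, hft]
      exact ih acc c
    | some p =>
      obtain ⟨tl, text⟩ := p
      simp only [bEmitStep, hft]
      rw [ih _ (c + 1)]
      simp [List.append_assoc]
  | case3 l ls h ih =>
    intro acc c
    rw [pvBlocks, if_neg h, pvE_blank_cons l ls c (by simpa using h)]
    exact ih acc c

-- ===== VERDICT (by name: the statement is the Claim_ definition above) =====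
theorem vtt_to_srt_spec : Claim_equal_vtt_to_srt := by
  intro v _
  unfold Spec_vtt_to_srt vtt_to_srt vtt_to_srt_alt
  simp only []
  rw [aOuter_eq_pvE, pvE_skip, bSplit_eq_pvBlocks, foldl_emit_eq]
  rfl
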